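-- pv_equiv track=rewrite | github.com/chrisuzor/PersonalProjects | CodeWars/ratings.py | countDecreasingRatings
-- ===== SOURCE A (Python) =====
-- def countDecreasingRatings(ratings):
--     ratings_dict = {}
--     counter = 1
--     for i in range(len(ratings)):
--         if i == 0:
--             ratings_dict[1] = 1
--         if i > 0:
--             ratings_dict[1] += 1
--             if ratings[i] - ratings[i - 1] == -1:
--                 counter += 1
--                 for j in range(2, counter):
--                     ratings_dict[j] += 1
--                 if counter in ratings_dict:
--                     ratings_dict[counter] += 1
--                 else:
--                     ratings_dict[counter] = 1
--             else:
--                 counter = 1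
--     return sum(ratings_dict.values())
-- ===== SOURCE B (Python) =====
-- def countDecreasingRatings(ratings):
--     total = 0
--     run = 0
--     prev = None
--     for x in ratings:
--         if prev is not None and x - prev == -1:
--             run += 1
--         else:
--             run = 1
--         total += run
--         prev = x
--     return total
-- ===== Notes on version B (the rewrite author's own statement) =====
-- stated objective: faster
-- what changed: Replaced the dict of per-length run counts (with an inner loop re-incrementing every shorter length at each step) by one pass that tracks only the current decreasing-by-one run length and adds it to a running total.
import Mathlib
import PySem

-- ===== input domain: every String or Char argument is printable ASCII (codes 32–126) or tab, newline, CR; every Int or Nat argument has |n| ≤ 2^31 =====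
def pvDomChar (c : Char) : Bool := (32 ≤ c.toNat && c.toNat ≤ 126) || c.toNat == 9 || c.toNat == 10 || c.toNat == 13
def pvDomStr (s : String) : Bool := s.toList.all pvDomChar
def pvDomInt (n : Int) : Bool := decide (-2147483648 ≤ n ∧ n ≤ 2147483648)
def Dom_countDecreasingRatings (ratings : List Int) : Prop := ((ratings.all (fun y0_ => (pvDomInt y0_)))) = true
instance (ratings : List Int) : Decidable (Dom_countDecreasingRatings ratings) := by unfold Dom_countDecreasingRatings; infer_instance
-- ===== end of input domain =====

-- B replaces A's dict of per-length run counts (rebuilt with an inner loop at every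
-- step, O(n^2)) by a single pass tracking only the current decreasing-by-one run
-- length, adding it to a running total (O(n)); objective: faster.

-- ===== PORT A =====
-- one iteration of A's `for i in range(len(ratings))` loop; state = (ratings_dict, counter)
def aStep (ratings : List Int) (st : PySem.Dict Int Int × Int) (i : Int) :
    PySem.Dict Int Int × Int :=
  let d := if i == 0 then st.1.insert 1 1 else st.1
  if 0 < i then
    let d := d.modify 1 0 (· + 1)
    if PySem.List.pyGetD ratings i 0 - PySem.List.pyGetD ratings (i - 1) 0 = -1 then
      let counter := st.2 + 1
      let d := (PySem.List.pyRange 2 counter).foldl (fun d j => d.modify j 0 (· + 1)) d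
      if d.contains counter then (d.modify counter 0 (· + 1), counter)
      else (d.insert counter 1, counter)
    else (d, 1)
  else (d, st.2)

def countDecreasingRatings (ratings : List Int) : Int :=
  ((PySem.List.pyRange 0 (ratings.length : Int)).foldl (aStep ratings)
      (PySem.Dict.empty, 1)).1.values.sum

-- ===== PORT B =====
-- one iteration of B's `for x in ratings` loop; state = (total, run, prev)
def bStep (st : Int × Int × Option Int) (x : Int) : Int × Int × Option Int :=
  let run := match st.2.2 with
    | some p => if x - p = -1 then st.2.1 + 1 else 1
    | none => 1
  (st.1 + run, run, some x)

def countDecreasingRatings_alt (ratings : List Int) : Int :=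
  (ratings.foldl bStep (0, 0, none)).1

-- ===== PRECONDITION & SPEC =====
def Spec_countDecreasingRatings (ratings : List Int) (out : Int) : Prop := out = countDecreasingRatings_alt ratings
instance (ratings : List Int) (out : Int) : Decidable (Spec_countDecreasingRatings ratings out) := by unfold Spec_countDecreasingRatings; infer_instance

-- ===== CLAIM (what is proved, stated in full; the proofs are below) =====
def Claim_equal_countDecreasingRatings : Prop := ∀ (ratings : List Int), Dom_countDecreasingRatings ratings → Spec_countDecreasingRatings ratings (countDecreasingRatings ratings)

-- ===== LEMMAS AND PROOFS =====

-- sum over a list with one distinguished element (occurring once) bumped by 1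
lemma sum_map_ite_add_one (xs : List Int) (f : Int → Int) (k : Int)
    (hnd : xs.Nodup) (hk : k ∈ xs) :
    (xs.map (fun j => if j = k then f j + 1 else f j)).sum = (xs.map f).sum + 1 := by
  induction xs with
  | nil => cases hk
  | cons a t ih =>
    by_cases hak : a = k
    · subst hak
      have ht : a ∉ t := (List.nodup_cons.mp hnd).1
      have hmap : t.map (fun j => if j = a then f j + 1 else f j) = t.map f := by
        apply List.map_congr_left
        intro j hj
        have hja : j ≠ a := fun e => ht (e ▸ hj)
        rw [if_neg hja]
      rw [List.map_cons, List.map_cons, if_pos rfl, List.sum_cons, List.sum_cons, hmap]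
      ring
    · have hk' : k ∈ t := by
        rcases List.mem_cons.mp hk with h | h
        · exact absurd h.symm hak
        · exact h
      rw [List.map_cons, List.map_cons, if_neg hak, List.sum_cons, List.sum_cons,
        ih (List.nodup_cons.mp hnd).2 hk']
      ring

lemma nodup_keys_modify (d : PySem.Dict Int Int) (k : Int) (f : Int → Int)
    (hnd : d.keys.Nodup) : (d.modify k 0 f).keys.Nodup := by
  rw [PySem.Dict.keys_modify]
  exact (PySem.Dict.nodup_keys_insert d k _ hnd)

-- `d.modify k 0 (·+1)` always raises the sum of values by exactly 1
lemma sum_values_modify (d : PySem.Dict Int Int) (k : Int) (hnd : d.keys.Nodup) :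
    (d.modify k 0 (· + 1)).values.sum = d.values.sum + 1 := by
  have hnd' := nodup_keys_modify d k (· + 1) hnd
  by_cases hc : d.contains k = true
  · have hkeys : (d.modify k 0 (· + 1)).keys = d.keys := by
      rw [PySem.Dict.keys_modify, PySem.Dict.keys_insert_of_contains _ _ hc]
    have hkmem : k ∈ d.keys := (PySem.Dict.contains_iff_mem_keys d k).mp hc
    rw [PySem.Dict.values_eq_map_keys _ hnd' 0, hkeys,
        PySem.Dict.values_eq_map_keys _ hnd 0]
    have : (d.keys.map fun k' => (d.modify k 0 (· + 1)).getD k' 0)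
        = d.keys.map (fun j => if j = k then d.getD j 0 + 1 else d.getD j 0) := by
      apply List.map_congr_left
      intro j hj
      rw [PySem.Dict.getD_modify]
      by_cases hjk : j = k <;> simp [hjk]
    rw [this]
    exact sum_map_ite_add_one d.keys (fun j => d.getD j 0) k hnd hkmem
  · have hc' : d.contains k = false := by simpa using hc
    have hkeys : (d.modify k 0 (· + 1)).keys = d.keys ++ [k] := by
      rw [PySem.Dict.keys_modify, PySem.Dict.keys_insert_of_not_contains _ _ hc']
    rw [PySem.Dict.values_eq_map_keys _ hnd' 0, hkeys,
        PySem.Dict.values_eq_map_keys _ hnd 0]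
    have hmap : (d.keys.map fun k' => (d.modify k 0 (· + 1)).getD k' 0)
        = d.keys.map (fun k' => d.getD k' 0) := by
      apply List.map_congr_left
      intro j hj
      have hjk : j ≠ k := by
        rintro rfl
        rw [(PySem.Dict.contains_iff_mem_keys d j).mpr hj] at hc'
        cases hc'
      rw [PySem.Dict.getD_modify]
      simp [hjk]
    have hlast : (d.modify k 0 (· + 1)).getD k 0 = 1 := by
      rw [PySem.Dict.getD_modify]
      simp [PySem.Dict.getD_of_not_contains d _ hc']
    simp [hmap, hlast]

-- inserting a FRESH key with value 1 also raises the sum of values by 1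
lemma sum_values_insert_fresh (d : PySem.Dict Int Int) (k : Int)
    (hc : d.contains k = false) :
    (d.insert k 1).values.sum = d.values.sum + 1 := by
  simp [PySem.Dict.values, PySem.Dict.items_insert_of_not_contains d 1 hc]

-- the inner `for j in range(2, counter)` loop: each step +1
lemma sum_values_foldl_modify (js : List Int) :
    ∀ (d : PySem.Dict Int Int), d.keys.Nodup →
      (js.foldl (fun d j => d.modify j 0 (· + 1)) d).keys.Nodup ∧
      (js.foldl (fun d j => d.modify j 0 (· + 1)) d).values.sum
        = d.values.sum + js.length := by
  induction js with
  | nil => intro d hnd; simpa using hnd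
  | cons j t ih =>
    intro d hnd
    obtain ⟨h1, h2⟩ := ih (d.modify j 0 (· + 1)) (nodup_keys_modify d j _ hnd)
    refine ⟨h1, ?_⟩
    rw [List.foldl_cons] at *
    rw [h2, sum_values_modify d j hnd, List.length_cons]
    push_cast
    ring

-- indexing agrees between a list and its extension, below the original length
lemma pyGetD_append_left (xs ys : List Int) (i : Int) (dflt : Int)
    (h0 : 0 ≤ i) (h1 : i < (xs.length : Int)) :
    PySem.List.pyGetD (xs ++ ys) i dflt = PySem.List.pyGetD xs i dflt := by
  have h1' : i < ((xs ++ ys).length : Int) := by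
    simp; omega
  rw [PySem.List.pyGetD_eq_getElem _ _ h0 h1', PySem.List.pyGetD_eq_getElem _ _ h0 h1]
  rw [List.getElem_append_left]

-- A's step at an index below xs.length does not look at the appended tail
lemma aStep_append (xs : List Int) (x : Int) (st : PySem.Dict Int Int × Int)
    (i : Int) (h0 : 0 ≤ i) (h1 : i < (xs.length : Int)) :
    aStep (xs ++ [x]) st i = aStep xs st i := by
  unfold aStep
  by_cases hpos : 0 < i
  · rw [pyGetD_append_left xs [x] i 0 (by omega) h1,
        pyGetD_append_left xs [x] (i - 1) 0 (by omega) (by omega)]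
  · simp [hpos]

-- the main loop invariant, by induction on the list from the right
lemma main_inv : ∀ (l : List Int) (h : l ≠ []),
    ((PySem.List.pyRange 0 (l.length : Int)).foldl (aStep l)
        (PySem.Dict.empty, 1)).1.keys.Nodup ∧
    ((PySem.List.pyRange 0 (l.length : Int)).foldl (aStep l)
        (PySem.Dict.empty, 1)).1.values.sum = (l.foldl bStep (0, 0, none)).1 ∧
    ((PySem.List.pyRange 0 (l.length : Int)).foldl (aStep l)
        (PySem.Dict.empty, 1)).2 = (l.foldl bStep (0, 0, none)).2.1 ∧
    1 ≤ ((PySem.List.pyRange 0 (l.length : Int)).foldl (aStep l)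
        (PySem.Dict.empty, 1)).2 ∧
    (l.foldl bStep (0, 0, none)).2.2 = some (l.getLast h) := by
  intro l
  induction l using List.reverseRecOn with
  | nil => intro h; exact absurd rfl h
  | append_singleton l x ih =>
    intro _
    rcases eq_or_ne l [] with rfl | hl
    · -- first element: i = 0 branch of A, prev = None branch of B
      simp only [List.nil_append]
      have hrange : PySem.List.pyRange 0 (([x] : List Int).length : Int) = [0] := by
        have h1 : (([x] : List Int).length : Int) = 0 + 1 := by simp
        rw [h1, PySem.List.pyRange_one_singleton]
      have hA : (PySem.List.pyRange 0 (([x] : List Int).length : Int)).foldl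
          (aStep [x]) (PySem.Dict.empty, 1) = (PySem.Dict.empty.insert 1 1, 1) := by
        rw [hrange]; rfl
      have hB : ([x] : List Int).foldl bStep (0, 0, none) = (1, 1, some x) := rfl
      rw [hA, hB]
      exact ⟨by decide, by rfl, rfl, by decide, by simp⟩
    · obtain ⟨hnd, hsum, hcr, hc1, hprev⟩ := ih hl
      set stA := (PySem.List.pyRange 0 (l.length : Int)).foldl (aStep l)
        (PySem.Dict.empty, 1) with hstA
      set stB := l.foldl bStep (0, 0, none) with hstB
      have hlen : ((l ++ [x]).length : Int) = (l.length : Int) + 1 := by simp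
      have hsplit : PySem.List.pyRange 0 ((l ++ [x]).length : Int)
          = PySem.List.pyRange 0 (l.length : Int) ++ [(l.length : Int)] := by
        rw [hlen, PySem.List.pyRange_one_succ_right (by positivity)]
      have hcongr : (PySem.List.pyRange 0 (l.length : Int)).foldl
          (aStep (l ++ [x])) (PySem.Dict.empty, 1) = stA := by
        rw [hstA]
        apply PySem.List.foldl_congr_mem
        intro acc i hi
        have := (PySem.List.mem_pyRange_one).mp hi
        exact aStep_append l x acc i this.1 this.2
      have hfoldA : (PySem.List.pyRange 0 ((l ++ [x]).length : Int)).foldl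
          (aStep (l ++ [x])) (PySem.Dict.empty, 1)
          = aStep (l ++ [x]) stA (l.length : Int) := by
        rw [hsplit, List.foldl_append, hcongr]
        simp
      have hfoldB : (l ++ [x]).foldl bStep (0, 0, none) = bStep stB x := by
        rw [List.foldl_append, ← hstB]; rfl
      have hnpos : (0 : Int) < (l.length : Int) := by
        have : l.length ≠ 0 := fun e => hl (List.eq_nil_of_length_eq_zero e)
        omega
      -- the two lookups at index n and n-1
      have hget_n : PySem.List.pyGetD (l ++ [x]) (l.length : Int) 0 = x := by
        rw [PySem.List.pyGetD_eq_getElem _ _ (by omega) (by simp)]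
        simp
      have hget_n1 : PySem.List.pyGetD (l ++ [x]) ((l.length : Int) - 1) 0
          = l.getLast hl := by
        rw [pyGetD_append_left l [x] _ 0 (by omega) (by omega),
            PySem.List.pyGetD_eq_getElem _ _ (by omega) (by omega),
            List.getLast_eq_getElem]
        congr 1
        omega
      have hne0 : ((l.length : Int) == 0) = false := by
        simp; omega
      rw [hfoldA, hfoldB]
      unfold aStep bStep
      rw [hprev]
      simp only [hne0, if_pos hnpos, hget_n, hget_n1, Bool.false_eq_true, if_false]
      by_cases hdec : x - l.getLast hl = -1
      · -- run continues: counter/run become stA.2 + 1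
        rw [if_pos hdec, if_pos hdec]
        obtain ⟨hnd2, hsum2⟩ := sum_values_foldl_modify
          (PySem.List.pyRange 2 (stA.2 + 1)) (stA.1.modify 1 0 (· + 1))
          (nodup_keys_modify stA.1 1 _ hnd)
        set d2 := (PySem.List.pyRange 2 (stA.2 + 1)).foldl
          (fun d j => d.modify j 0 (· + 1)) (stA.1.modify 1 0 (· + 1)) with hd2
        have hlen2 : ((PySem.List.pyRange 2 (stA.2 + 1)).length : Int) = stA.2 - 1 := by
          rw [PySem.List.length_pyRange_one]
          omega
        have hsum2' : d2.values.sum = stA.1.values.sum + stA.2 := by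
          rw [hsum2, sum_values_modify stA.1 1 hnd, hlen2]
          ring
        by_cases hcont : d2.contains (stA.2 + 1) = true
        · rw [if_pos hcont]
          refine ⟨nodup_keys_modify d2 _ _ hnd2, ?_, by simp [hcr], by omega, by simp⟩
          rw [sum_values_modify d2 _ hnd2, hsum2', hsum, hcr]
          ring
        · have hcont' : d2.contains (stA.2 + 1) = false := by simpa using hcont
          rw [if_neg hcont]
          refine ⟨?_, ?_, by simp [hcr], by omega, by simp⟩
          · rw [PySem.Dict.keys_insert_of_not_contains _ _ hcont']
            refine List.Nodup.append hnd2 (List.nodup_singleton _) ?_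
            intro a ha hb
            have : a = stA.2 + 1 := by simpa using hb
            subst this
            rw [(PySem.Dict.contains_iff_mem_keys d2 _).mpr ha] at hcont'
            cases hcont'
          · rw [sum_values_insert_fresh d2 _ hcont', hsum2', hsum, hcr]
            ring
      · -- run broken: counter/run reset to 1
        rw [if_neg hdec, if_neg hdec]
        refine ⟨nodup_keys_modify stA.1 1 _ hnd, ?_, rfl, le_refl 1, by simp⟩
        rw [sum_values_modify stA.1 1 hnd, hsum]

-- ===== VERDICT (by name: the statement is the Claim_ definition above) =====
theorem countDecreasingRatings_spec : Claim_equal_countDecreasingRatings := by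
  intro ratings _
  unfold Spec_countDecreasingRatings countDecreasingRatings countDecreasingRatings_alt
  rcases eq_or_ne ratings [] with rfl | h
  · decide
  · exact (main_inv ratings h).2.1
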